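-- pv_equiv track=rewrite | github.com/L-Mathers/BAP_Analytics | processing_library/analysis_aggregator.py | _get_criteria_dict
-- ===== SOURCE A (Python) =====
-- def _get_criteria_dict(target):
--     """
--     Extract criteria from a target definition, excluding metadata fields.
--
--     Standardizes the criteria fields so that related targets (like DCIR and normalized DCIR)
--     will be grouped together properly.
--     """
--     # Fields that define target metadata, not matching criteria
--     ignore_keys = {
--         "key",
--         "interest_variable",
--         "per_cycle",
--         "aggregation",
--         "time_series",
--         "from_group",
--     }
--
--     # Extract the criteria but normalize them
--     criteria = {}
--
--     # Group type is a primary grouping factor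
--     if "group_type" in target:
--         criteria["group_type"] = target["group_type"]
--
--     # Pulse status affects which measurements are available
--     if "pulse" in target:
--         criteria["pulse"] = target["pulse"]
--
--     # SOC value is critical for DCIR and normalized DCIR to match
--     if "soc" in target:
--         criteria["soc"] = target["soc"]
--
--     # C-rate is important for regular measurements
--     if "crate" in target:
--         criteria["crate"] = target["crate"]
--
--     # Test type is used for some specific cases
--     if "test_type" in target:
--         criteria["test_type"] = target["test_type"]
--
--     # Add any other criteria fields that aren't in the ignore list
--     for key, value in target.items():
--         if key not in ignore_keys and key not in criteria:
--             criteria[key] = value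
--
--     return criteria
-- ===== SOURCE B (Python) =====
-- def _get_criteria_dict(target):
--     ignore_keys = {
--         "key",
--         "interest_variable",
--         "per_cycle",
--         "aggregation",
--         "time_series",
--         "from_group",
--     }
--     rank = {"group_type": 0, "pulse": 1, "soc": 2, "crate": 3, "test_type": 4}
--     # bucket sort: distribute each kept item into the bucket of its rank
--     # (5 priority buckets + one overflow bucket), then concatenate in rank order
--     buckets = [[], [], [], [], [], []]
--     for k, v in target.items():
--         if k not in ignore_keys:
--             buckets[rank.get(k, 5)].append((k, v))
--     return dict(kv for b in buckets for kv in b)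
-- ===== Notes on version B (the rewrite author's own statement) =====
-- stated objective: alternative
-- what changed: Replaces A's five-if cascade plus a second loop that tests membership in the growing result with a one-pass bucket sort: each non-ignored item is distributed into one of six rank buckets (five priority keys + overflow) and the buckets are concatenated in rank order.
import Mathlib
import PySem

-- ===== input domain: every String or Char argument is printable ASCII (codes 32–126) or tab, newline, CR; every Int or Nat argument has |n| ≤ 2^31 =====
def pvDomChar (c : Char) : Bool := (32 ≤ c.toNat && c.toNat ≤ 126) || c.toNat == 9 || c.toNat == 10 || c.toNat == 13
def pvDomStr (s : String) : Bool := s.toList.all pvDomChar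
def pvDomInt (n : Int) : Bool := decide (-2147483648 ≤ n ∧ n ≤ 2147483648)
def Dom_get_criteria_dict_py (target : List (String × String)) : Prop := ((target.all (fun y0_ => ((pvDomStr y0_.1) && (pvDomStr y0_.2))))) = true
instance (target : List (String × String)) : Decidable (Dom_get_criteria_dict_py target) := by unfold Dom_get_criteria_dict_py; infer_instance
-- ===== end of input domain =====

-- B replaces A's five-if cascade plus a membership-testing loop by a one-pass bucket sort
-- (six rank buckets, concatenated in rank order); same cost, a different algorithm.

-- metadata fields excluded from the criteria (shared constant data of both programs)
def pvIgnore : List String :=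
  ["key", "interest_variable", "per_cycle", "aggregation", "time_series", "from_group"]

-- ===== PORT A =====
-- `if k in target: criteria[k] = target[k]`
def pvAddIf (t : PySem.Dict String String) (c : PySem.Dict String String) (k : String) :
    PySem.Dict String String :=
  match t.get? k with
  | some v => c.insert k v
  | none => c

def get_criteria_dict_py (target : List (String × String)) : List (String × String) :=
  let t := PySem.Dict.mk target
  let c := PySem.Dict.empty
  let c := pvAddIf t c "group_type"
  let c := pvAddIf t c "pulse"
  let c := pvAddIf t c "soc"
  let c := pvAddIf t c "crate"
  let c := pvAddIf t c "test_type"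
  (target.foldl
    (fun c kv => if kv.1 ∉ pvIgnore ∧ c.contains kv.1 = false then c.insert kv.1 kv.2 else c)
    c).items

-- ===== PORT B =====
-- rank = {"group_type": 0, "pulse": 1, "soc": 2, "crate": 3, "test_type": 4}; rank.get(k, 5)
def pvRank (k : String) : Nat :=
  (PySem.Dict.mk [("group_type", 0), ("pulse", 1), ("soc", 2), ("crate", 3),
    ("test_type", 4)]).getD k 5

-- buckets = [[], [], [], [], [], []]
structure PvBuckets where
  b0 : List (String × String)
  b1 : List (String × String)
  b2 : List (String × String)
  b3 : List (String × String)
  b4 : List (String × String)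
  b5 : List (String × String)
deriving Repr, DecidableEq

-- loop body: if k not in ignore_keys: buckets[rank.get(k, 5)].append((k, v))
def pvBStep (b : PvBuckets) (kv : String × String) : PvBuckets :=
  if kv.1 ∈ pvIgnore then b
  else
    match pvRank kv.1 with
    | 0 => { b with b0 := b.b0 ++ [kv] }
    | 1 => { b with b1 := b.b1 ++ [kv] }
    | 2 => { b with b2 := b.b2 ++ [kv] }
    | 3 => { b with b3 := b.b3 ++ [kv] }
    | 4 => { b with b4 := b.b4 ++ [kv] }
    | _ => { b with b5 := b.b5 ++ [kv] }

def get_criteria_dict_py_alt (target : List (String × String)) : List (String × String) :=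
  let b := target.foldl pvBStep ⟨[], [], [], [], [], []⟩
  let flat := b.b0 ++ b.b1 ++ b.b2 ++ b.b3 ++ b.b4 ++ b.b5
  (flat.foldl (fun d kv => d.insert kv.1 kv.2) PySem.Dict.empty).items

-- ===== PRECONDITION & SPEC =====
-- Pre_ excludes association lists with duplicate keys: they do not represent any Python dict
-- (A's argument is a dict, whose keys are unique), so neither program's behaviour there is specified.
def Pre_get_criteria_dict_py (target : List (String × String)) : Prop :=
  (target.map Prod.fst).Nodup
instance (target : List (String × String)) : Decidable (Pre_get_criteria_dict_py target) := by
  unfold Pre_get_criteria_dict_py; infer_instance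

def pvWitness_get_criteria_dict_py : (List (String × String)) :=
  [("group_type", "crate"), ("soc", "50"), ("key", "k1"), ("other", "y")]

def Spec_get_criteria_dict_py (target : List (String × String)) (out : List (String × String)) : Prop := out = get_criteria_dict_py_alt target
instance (target : List (String × String)) (out : List (String × String)) : Decidable (Spec_get_criteria_dict_py target out) := by unfold Spec_get_criteria_dict_py; infer_instance

-- ===== CLAIM (what is proved, stated in full; the proofs are below) =====
def Claim_equal_get_criteria_dict_py : Prop := ∀ (target : List (String × String)), Dom_get_criteria_dict_py target → Pre_get_criteria_dict_py target → Spec_get_criteria_dict_py target (get_criteria_dict_py target)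

-- ===== LEMMAS AND PROOFS =====

def pvPriority : List String := ["group_type", "pulse", "soc", "crate", "test_type"]

-- B's priority head, the normal form both sides are reduced to
def pvHead (t : PySem.Dict String String) : List (String × String) :=
  pvPriority.filterMap (fun k => (t.get? k).map (fun v => (k, v)))

-- A's five-if cascade produces exactly the priority head, for any dict t.
lemma pv_c5_items (t : PySem.Dict String String) :
    (pvAddIf t (pvAddIf t (pvAddIf t (pvAddIf t (pvAddIf t PySem.Dict.empty "group_type")
        "pulse") "soc") "crate") "test_type").items = pvHead t := by
  cases h0 : t.get? "group_type" <;> cases h1 : t.get? "pulse" <;> cases h2 : t.get? "soc" <;>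
    cases h3 : t.get? "crate" <;> cases h4 : t.get? "test_type" <;>
      simp [pvAddIf, pvHead, pvPriority, h0, h1, h2, h3, h4, PySem.Dict.items_insert,
        PySem.Dict.contains_insert, PySem.Dict.empty]

-- membership in the cascade result, for any dict t and key k
lemma pv_contains_addIf (t c : PySem.Dict String String) (k' k : String) :
    (pvAddIf t c k').contains k = ((k == k') && (t.get? k').isSome || c.contains k) := by
  unfold pvAddIf
  cases h : t.get? k' <;> simp_all [PySem.Dict.contains_insert]

-- A's loop over the items, started from a dict that contains exactly the priority keys
-- of the remaining items, appends exactly the non-priority tail.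
lemma pv_loopA (xs : List (String × String)) :
    ∀ (c : PySem.Dict String String), (xs.map Prod.fst).Nodup →
    (∀ kv ∈ xs, c.contains kv.1 = decide (kv.1 ∈ pvPriority)) →
    (xs.foldl
      (fun c kv => if kv.1 ∉ pvIgnore ∧ c.contains kv.1 = false then c.insert kv.1 kv.2 else c)
      c).items
      = c.items ++ xs.filter (fun kv => kv.1 ∉ pvIgnore ∧ kv.1 ∉ pvPriority) := by
  induction xs with
  | nil => intro c _ _; simp
  | cons kv xs ih =>
    intro c hnd hc
    have hkv := hc kv (List.mem_cons_self ..)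
    simp only [List.map_cons, List.nodup_cons] at hnd
    by_cases hp : kv.1 ∈ pvPriority
    · have hct : c.contains kv.1 = true := by simp [hkv, hp]
      have : (if kv.1 ∉ pvIgnore ∧ c.contains kv.1 = false then c.insert kv.1 kv.2 else c) = c := by
        simp [hct]
      rw [List.foldl_cons, this, ih c hnd.2 (fun kv' h' => hc kv' (List.mem_cons_of_mem _ h'))]
      simp [hp]
    · have hcf : c.contains kv.1 = false := by simp [hkv, hp]
      by_cases hi : kv.1 ∈ pvIgnore
      · have : (if kv.1 ∉ pvIgnore ∧ c.contains kv.1 = false then c.insert kv.1 kv.2 else c) = c := by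
          simp [hi]
        rw [List.foldl_cons, this, ih c hnd.2 (fun kv' h' => hc kv' (List.mem_cons_of_mem _ h'))]
        simp [hi]
      · have hstep : (if kv.1 ∉ pvIgnore ∧ c.contains kv.1 = false then c.insert kv.1 kv.2 else c)
            = c.insert kv.1 kv.2 := by simp [hi, hcf]
        have hinv : ∀ kv' ∈ xs, (c.insert kv.1 kv.2).contains kv'.1 = decide (kv'.1 ∈ pvPriority) := by
          intro kv' h'
          have hne : kv'.1 ≠ kv.1 := by
            intro he; exact hnd.1 (he ▸ List.mem_map_of_mem h')
          rw [PySem.Dict.contains_insert]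
          simp [hne, hc kv' (List.mem_cons_of_mem _ h')]
        rw [List.foldl_cons, hstep, ih _ hnd.2 hinv]
        simp [PySem.Dict.items_insert, hcf, hi, hp]

-- rank as an if-chain (unfolds B's rank dict)
lemma pv_rank_eq (k : String) :
    pvRank k = if k = "group_type" then 0 else if k = "pulse" then 1 else if k = "soc" then 2
      else if k = "crate" then 3 else if k = "test_type" then 4 else 5 := by
  by_cases h0 : k = "group_type"
  · subst h0; decide
  by_cases h1 : k = "pulse"
  · subst h1; decide
  by_cases h2 : k = "soc"
  · subst h2; decide
  by_cases h3 : k = "crate"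
  · subst h3; decide
  by_cases h4 : k = "test_type"
  · subst h4; decide
  simp [pvRank, PySem.Dict.getD_eq_get?_getD, PySem.Dict.get?,
    h0, h1, h2, h3, h4, Ne.symm h0, Ne.symm h1, Ne.symm h2, Ne.symm h3, Ne.symm h4]

-- the bucket invariant: B's distribution pass appends, to each bucket, the filter of its rank
lemma pv_buckets (xs : List (String × String)) : ∀ (b : PvBuckets),
    xs.foldl pvBStep b =
      ⟨b.b0 ++ xs.filter (fun kv => kv.1 ∉ pvIgnore ∧ pvRank kv.1 = 0),
       b.b1 ++ xs.filter (fun kv => kv.1 ∉ pvIgnore ∧ pvRank kv.1 = 1),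
       b.b2 ++ xs.filter (fun kv => kv.1 ∉ pvIgnore ∧ pvRank kv.1 = 2),
       b.b3 ++ xs.filter (fun kv => kv.1 ∉ pvIgnore ∧ pvRank kv.1 = 3),
       b.b4 ++ xs.filter (fun kv => kv.1 ∉ pvIgnore ∧ pvRank kv.1 = 4),
       b.b5 ++ xs.filter (fun kv => kv.1 ∉ pvIgnore ∧ pvRank kv.1 = 5)⟩ := by
  induction xs with
  | nil => intro b; simp
  | cons kv xs ih =>
    intro b
    rw [List.foldl_cons, ih]
    by_cases hi : kv.1 ∈ pvIgnore
    · simp [pvBStep, hi]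
    · have h5 : pvRank kv.1 ≤ 5 := by rw [pv_rank_eq]; split_ifs <;> omega
      interval_cases h : pvRank kv.1 <;> simp [pvBStep, hi, h]
  
-- on a list with unique keys, the filter at one key is the dict lookup's singleton
lemma pv_filter_key (xs : List (String × String)) (p : String)
    (hnd : (xs.map Prod.fst).Nodup) :
    xs.filter (fun kv => kv.1 == p)
      = ((PySem.Dict.mk xs).get? p).elim [] (fun v => [(p, v)]) := by
  induction xs with
  | nil => simp [PySem.Dict.get?]
  | cons kv xs ih =>
    obtain ⟨k, v⟩ := kv
    simp only [List.map_cons, List.nodup_cons] at hnd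
    rw [List.filter_cons, PySem.Dict.get?_mk_cons]
    by_cases h : k = p
    · subst h
      have hfil : xs.filter (fun kv' => kv'.1 == k) = [] := by
        rw [List.filter_eq_nil_iff]
        intro kv' h'
        simp only [beq_iff_eq]
        intro he
        exact hnd.1 (he ▸ List.mem_map_of_mem h')
      simp [hfil]
    · simp only [beq_iff_eq, h, if_false, ih hnd.2]

-- rank i < 5 names exactly the i-th priority key (bucket predicates as key tests)
lemma pv_rank_ne (k : String) (i : Nat) (hi : i < 5) (hk : k ≠ pvPriority[i]!) :
    pvRank k ≠ i := by
  rw [pv_rank_eq]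
  interval_cases i <;> simp_all [pvPriority] <;> split_ifs <;> simp_all

lemma pv_pred_eq (i : Nat) (hi : i < 5) (kv : String × String) :
    decide (kv.1 ∉ pvIgnore ∧ pvRank kv.1 = i) = (kv.1 == pvPriority[i]!) := by
  have key : ∀ k : String, decide (k ∉ pvIgnore ∧ pvRank k = i) = (k == pvPriority[i]!) := by
    intro k
    by_cases h : k = pvPriority[i]!
    · subst h; interval_cases i <;> decide
    · have h' : ¬ k = pvPriority[i]?.getD "" := by
        simpa [List.getElem!_eq_getElem?_getD] using h
      simp [h', pv_rank_ne k i hi h]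
  exact key kv.1

-- rank 5 is exactly "not a priority key"
lemma pv_rank5 (k : String) : pvRank k = 5 ↔ k ∉ pvPriority := by
  rw [pv_rank_eq]
  split_ifs <;> simp_all [pvPriority]

-- the priority head is the concatenation of the five per-key lookups
lemma pv_head_eq (t : PySem.Dict String String) :
    pvHead t
      = ((t.get? "group_type").elim [] (fun v => [("group_type", v)]))
        ++ ((t.get? "pulse").elim [] (fun v => [("pulse", v)]))
        ++ ((t.get? "soc").elim [] (fun v => [("soc", v)]))
        ++ ((t.get? "crate").elim [] (fun v => [("crate", v)]))
        ++ ((t.get? "test_type").elim [] (fun v => [("test_type", v)])) := by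
  cases h0 : t.get? "group_type" <;> cases h1 : t.get? "pulse" <;> cases h2 : t.get? "soc" <;>
    cases h3 : t.get? "crate" <;> cases h4 : t.get? "test_type" <;>
      simp [pvHead, pvPriority, h0, h1, h2, h3, h4]

-- the keys of the priority head form a sublist of pvPriority
lemma pv_head_keys_sublist (t : PySem.Dict String String) (l : List String) :
    ((l.filterMap (fun k => (t.get? k).map (fun v => (k, v)))).map Prod.fst).Sublist l := by
  induction l with
  | nil => simp
  | cons k l ih =>
    cases h : t.get? k with
    | none => simp only [List.filterMap_cons, h, Option.map_none]; exact ih.cons _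
    | some v => simp only [List.filterMap_cons, h, Option.map_some, List.map_cons]; exact ih.cons₂ _

-- rebuilding the dict from a list with distinct keys returns it unchanged
lemma pv_dict_of_nodup (l : List (String × String)) (hnd : (l.map Prod.fst).Nodup) :
    ((l.foldl (fun d kv => d.insert kv.1 kv.2) PySem.Dict.empty)).items = l := by
  have h := PySem.Dict.items_foldl_insert_fresh (l := l) (k := Prod.fst) (v := Prod.snd)
    (d := PySem.Dict.empty) (by intro a _; simp [PySem.Dict.contains_empty]) hnd
  simpa using h

-- ===== VERDICT (by name: the statement is the Claim_ definition above) =====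
theorem get_criteria_dict_py_spec : Claim_equal_get_criteria_dict_py := by
  intro target _ hpre
  unfold Spec_get_criteria_dict_py get_criteria_dict_py get_criteria_dict_py_alt
  simp only []
  set t := PySem.Dict.mk target with ht
  have hkeys : t.keys = target.map Prod.fst := by simp [ht, PySem.Dict.keys_mk]
  -- initial invariant of A's loop
  have hinv : ∀ kv ∈ target,
      (pvAddIf t (pvAddIf t (pvAddIf t (pvAddIf t (pvAddIf t PySem.Dict.empty "group_type")
        "pulse") "soc") "crate") "test_type").contains kv.1 = decide (kv.1 ∈ pvPriority) := by
    intro kv hm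
    have hsome : (t.get? kv.1).isSome = true := by
      rw [Option.isSome_iff_ne_none]
      intro hn
      rw [PySem.Dict.get?_eq_none_iff_not_mem_keys] at hn
      exact hn (hkeys ▸ List.mem_map_of_mem hm)
    by_cases hp : kv.1 ∈ pvPriority
    · simp only [pvPriority, List.mem_cons, List.not_mem_nil, or_false] at hp
      rcases hp with h | h | h | h | h <;> rw [h] at hsome ⊢ <;>
        simp [pv_contains_addIf, PySem.Dict.contains_empty, hsome, pvPriority]
    · have h5 : kv.1 ≠ "group_type" ∧ kv.1 ≠ "pulse" ∧ kv.1 ≠ "soc" ∧ kv.1 ≠ "crate" ∧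
          kv.1 ≠ "test_type" := by
        simp only [pvPriority, List.mem_cons, List.not_mem_nil, or_false, not_or] at hp
        exact ⟨hp.1, hp.2.1, hp.2.2.1, hp.2.2.2.1, hp.2.2.2.2⟩
      simp [pv_contains_addIf, PySem.Dict.contains_empty, h5.1, h5.2.1, h5.2.2.1,
        h5.2.2.2.1, h5.2.2.2.2, hp]
  rw [pv_loopA target _ hpre hinv, pv_c5_items]
  -- B side: the buckets are the per-rank filters …
  rw [pv_buckets target ⟨[], [], [], [], [], []⟩]
  simp only [List.nil_append]
  -- … the five priority buckets are the per-key filters = dict lookups …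
  have hfk : ∀ i : Nat, i < 5 →
      target.filter (fun kv => decide (kv.1 ∉ pvIgnore ∧ pvRank kv.1 = i))
        = ((t.get? pvPriority[i]!).elim [] (fun v => (pvPriority[i]!, v) :: [])) := by
    intro i hi
    rw [List.filter_congr (fun kv _ => pv_pred_eq i hi kv), pv_filter_key target _ hpre, ht]
  -- … and the overflow bucket is A's tail filter.
  have hf5 : target.filter (fun kv => decide (kv.1 ∉ pvIgnore ∧ pvRank kv.1 = 5))
      = target.filter (fun kv => kv.1 ∉ pvIgnore ∧ kv.1 ∉ pvPriority) := by
    apply List.filter_congr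
    intro kv _
    simp [pv_rank5]
  rw [hf5]
  have h0 := hfk 0 (by omega); have h1 := hfk 1 (by omega); have h2 := hfk 2 (by omega)
  have h3 := hfk 3 (by omega); have h4 := hfk 4 (by omega)
  simp only [pvPriority] at h0 h1 h2 h3 h4
  simp only [List.getElem!_cons_zero, List.getElem!_cons_succ] at h0 h1 h2 h3 h4
  rw [h0, h1, h2, h3, h4]
  -- rebuilding the concatenation (whose keys are distinct) as a dict is the identity
  have hheadnd : ((pvHead t).map Prod.fst).Nodup :=
    (pv_head_keys_sublist t pvPriority).nodup (by decide)
  have htailnd : ((target.filter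
      (fun kv => kv.1 ∉ pvIgnore ∧ kv.1 ∉ pvPriority)).map Prod.fst).Nodup :=
    ((List.filter_sublist (l := target)).map Prod.fst).nodup hpre
  have hdisj : ∀ k ∈ (pvHead t).map Prod.fst, ∀ k' ∈ (target.filter
        (fun kv => kv.1 ∉ pvIgnore ∧ kv.1 ∉ pvPriority)).map Prod.fst, k ≠ k' := by
    intro k hk k' hk' he
    have hkp : k ∈ pvPriority := (pv_head_keys_sublist t pvPriority).mem hk
    rcases List.mem_map.1 hk' with ⟨kv, hm, hfst⟩
    have := (List.mem_filter.1 hm).2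
    simp only [decide_eq_true_eq] at this
    exact this.2 (hfst ▸ he ▸ hkp)
  have hnd : ((pvHead t
      ++ target.filter (fun kv => kv.1 ∉ pvIgnore ∧ kv.1 ∉ pvPriority)).map Prod.fst).Nodup := by
    rw [List.map_append, List.nodup_append]
    exact ⟨hheadnd, htailnd, fun k hk k' hk' => hdisj k hk k' hk'⟩
  have hrebuild := pv_dict_of_nodup _ hnd
  rw [pv_head_eq t] at hrebuild ⊢
  simp only [List.append_assoc] at hrebuild ⊢
  exact hrebuild.symm
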